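-- pv_equiv track=rewrite | github.com/SohanChunduru/Championship-Record-Form | app.py | assign_championship_points
-- ===== SOURCE A (Python) =====
-- def assign_championship_points(sorted_dogs):
--     num_dogs = len(sorted_dogs)
--     points_map = {
--         range(3, 7): [2, 1, 0, 0, 0],
--         range(7, 10): [3, 2, 1, 0, 0],
--         range(10, 20): [4, 3, 2, 1, 0],
--         range(20, 1000): [5, 4, 3, 2, 1]
--     }
--
--     points = [0] * len(sorted_dogs)
--
--     for r, p_list in points_map.items():
--         if num_dogs in r:
--             for i in range(min(5, num_dogs)):
--                 points[i] = p_list[i]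
--             break
--
--     return points
-- ===== SOURCE B (Python) =====
-- def assign_championship_points(sorted_dogs):
--     n = len(sorted_dogs)
--     if 3 <= n <= 6:
--         top = 2
--     elif 7 <= n <= 9:
--         top = 3
--     elif 10 <= n <= 19:
--         top = 4
--     elif 20 <= n <= 999:
--         top = 5
--     else:
--         top = 0
--     return [max(top - i, 0) for i in range(n)]
-- ===== Notes on version B (the rewrite author's own statement) =====
-- stated objective: simpler
-- what changed: Replaces the range-keyed points_map and in-place prefix-copy loop by a single threshold-selected top value T and the closed form [max(T - i, 0) for i in range(n)].
import Mathlib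
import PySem

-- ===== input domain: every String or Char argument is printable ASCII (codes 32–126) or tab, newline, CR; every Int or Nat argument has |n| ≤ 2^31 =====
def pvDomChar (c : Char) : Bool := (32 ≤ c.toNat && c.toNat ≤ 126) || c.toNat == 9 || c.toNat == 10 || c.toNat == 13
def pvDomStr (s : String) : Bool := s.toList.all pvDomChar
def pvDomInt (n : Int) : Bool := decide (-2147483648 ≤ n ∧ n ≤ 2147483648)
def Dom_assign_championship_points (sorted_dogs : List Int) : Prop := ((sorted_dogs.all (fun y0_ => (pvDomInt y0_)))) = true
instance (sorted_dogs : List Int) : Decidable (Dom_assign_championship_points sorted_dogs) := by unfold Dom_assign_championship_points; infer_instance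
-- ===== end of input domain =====

-- ===== PORT A =====
-- B replaces the range-keyed points_map and prefix-copy loop by a closed form max(T-i,0); same return values (objective: simpler).
-- loop over points_map.items() with break: take the first matching range, copy the prefix, stop
def pvLoopA (num_dogs : Nat) : List ((Nat × Nat) × List Int) → List Int → List Int
  | [], pts => pts
  | ((lo, hi), p_list) :: rest, pts =>
    if lo ≤ num_dogs ∧ num_dogs < hi then
      -- for i in range(min(5, num_dogs)): points[i] = p_list[i]  (i < 5 always, so the index is in range)
      (List.range (min 5 num_dogs)).foldl (fun acc i => acc.set i (p_list.getD i 0)) pts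
    else pvLoopA num_dogs rest pts

def assign_championship_points (sorted_dogs : List Int) : List Int :=
  let num_dogs := sorted_dogs.length
  let points_map : List ((Nat × Nat) × List Int) :=
    [((3, 7), [2, 1, 0, 0, 0]), ((7, 10), [3, 2, 1, 0, 0]),
     ((10, 20), [4, 3, 2, 1, 0]), ((20, 1000), [5, 4, 3, 2, 1])]
  let points := List.replicate sorted_dogs.length 0
  pvLoopA num_dogs points_map points

-- ===== PORT B =====
def assign_championship_points_alt (sorted_dogs : List Int) : List Int :=
  let n := sorted_dogs.length
  let top : Int :=
    if 3 ≤ n ∧ n ≤ 6 then 2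
    else if 7 ≤ n ∧ n ≤ 9 then 3
    else if 10 ≤ n ∧ n ≤ 19 then 4
    else if 20 ≤ n ∧ n ≤ 999 then 5
    else 0
  (List.range n).map (fun (i : Nat) => max (top - (i : Int)) 0)

-- ===== PRECONDITION & SPEC =====
def Spec_assign_championship_points (sorted_dogs : List Int) (out : List Int) : Prop := out = assign_championship_points_alt sorted_dogs
instance (sorted_dogs : List Int) (out : List Int) : Decidable (Spec_assign_championship_points sorted_dogs out) := by unfold Spec_assign_championship_points; infer_instance

-- ===== CLAIM (what is proved, stated in full; the proofs are below) =====
def Claim_equal_assign_championship_points : Prop := ∀ (sorted_dogs : List Int), Dom_assign_championship_points sorted_dogs → Spec_assign_championship_points sorted_dogs (assign_championship_points sorted_dogs)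

-- ===== LEMMAS AND PROOFS =====
theorem pvFoldSet_length (g : Nat → Int) (k : Nat) (l : List Int) :
    ((List.range k).foldl (fun acc i => acc.set i (g i)) l).length = l.length := by
  induction k with
  | zero => simp
  | succ k ih => simp [List.range_succ, List.foldl_append, ih]

theorem pvFoldSet_getElem? (g : Nat → Int) (k : Nat) (l : List Int) (j : Nat) :
    ((List.range k).foldl (fun acc i => acc.set i (g i)) l)[j]? =
      if j < k ∧ j < l.length then some (g j) else l[j]? := by
  induction k with
  | zero => simp
  | succ k ih =>
    rw [List.range_succ, List.foldl_append]
    simp only [List.foldl_cons, List.foldl_nil]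
    rw [List.getElem?_set, pvFoldSet_length, ih]
    by_cases hkj : k = j
    · subst hkj
      by_cases hk : k < l.length
      · simp [hk]
      · rw [if_pos rfl, if_neg hk, if_neg (show ¬(k < k + 1 ∧ k < l.length) by omega)]
        exact (List.getElem?_eq_none (by omega)).symm
    · rw [if_neg hkj,
        if_congr (by omega : (j < k ∧ j < l.length) ↔ (j < k + 1 ∧ j < l.length)) rfl rfl]

theorem pvMapRange (f : Nat → Int) (n m : Nat) :
    ((List.range n).map f)[m]? = if m < n then some (f m) else none := by
  by_cases h : m < n
  · rw [List.getElem?_map, List.getElem?_range h, if_pos h]; rfl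
  · rw [List.getElem?_eq_none (by simp; omega), if_neg h]

theorem pvPl2 (i : Nat) : ([2, 1, 0, 0, 0] : List Int).getD i 0 = max (2 - (i : Int)) 0 := by
  match i with
  | 0 | 1 | 2 | 3 | 4 => rfl
  | n + 5 => simp [List.getD]; omega

theorem pvPl3 (i : Nat) : ([3, 2, 1, 0, 0] : List Int).getD i 0 = max (3 - (i : Int)) 0 := by
  match i with
  | 0 | 1 | 2 | 3 | 4 => rfl
  | n + 5 => simp [List.getD]; omega

theorem pvPl4 (i : Nat) : ([4, 3, 2, 1, 0] : List Int).getD i 0 = max (4 - (i : Int)) 0 := by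
  match i with
  | 0 | 1 | 2 | 3 | 4 => rfl
  | n + 5 => simp [List.getD]; omega

theorem pvPl5 (i : Nat) : ([5, 4, 3, 2, 1] : List Int).getD i 0 = max (5 - (i : Int)) 0 := by
  match i with
  | 0 | 1 | 2 | 3 | 4 => rfl
  | n + 5 => simp [List.getD]

-- matched case: copying the p_list prefix (p_list[i] = max (T - i) 0) onto zeros equals the closed form
theorem pvCase (n : Nat) (T : Int) (p_list : List Int) (hT : 0 ≤ T ∧ T ≤ 5)
    (hp : ∀ i : Nat, p_list.getD i 0 = max (T - (i : Int)) 0) :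
    (List.range (min 5 n)).foldl (fun acc i => acc.set i (p_list.getD i 0)) (List.replicate n 0) =
      (List.range n).map (fun (i : Nat) => max (T - (i : Int)) 0) := by
  apply List.ext_getElem?
  intro j
  rw [pvFoldSet_getElem?, pvMapRange, List.length_replicate, List.getElem?_replicate]
  by_cases hjn : j < n
  · by_cases hj5 : j < 5
    · rw [if_pos ⟨by omega, hjn⟩, if_pos hjn, hp j]
    · rw [if_neg (by omega), if_pos hjn, if_pos hjn]
      have : max (T - (j : Int)) 0 = 0 := by omega
      rw [this]
  · rw [if_neg (by omega), if_neg hjn, if_neg hjn]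

-- unmatched case: all zeros equals the closed form with T = 0
theorem pvZero (n : Nat) :
    (List.replicate n (0 : Int)) = (List.range n).map (fun (i : Nat) => max ((0 : Int) - (i : Int)) 0) := by
  apply List.ext_getElem?
  intro j
  rw [pvMapRange, List.getElem?_replicate]
  by_cases hjn : j < n
  · rw [if_pos hjn, if_pos hjn]
    have : max ((0 : Int) - (j : Int)) 0 = 0 := by omega
    rw [this]
  · rw [if_neg hjn, if_neg hjn]

-- ===== VERDICT (by name: the statement is the Claim_ definition above) =====
theorem assign_championship_points_spec : Claim_equal_assign_championship_points := by
  intro l _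
  unfold Spec_assign_championship_points
  simp only [assign_championship_points, assign_championship_points_alt, pvLoopA]
  split_ifs <;> first
  | exact pvCase l.length 2 [2, 1, 0, 0, 0] (by omega) pvPl2
  | exact pvCase l.length 3 [3, 2, 1, 0, 0] (by omega) pvPl3
  | exact pvCase l.length 4 [4, 3, 2, 1, 0] (by omega) pvPl4
  | exact pvCase l.length 5 [5, 4, 3, 2, 1] (by omega) pvPl5
  | exact pvZero l.length
  | (exfalso; omega)
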